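-- pv_equiv track=rewrite | github.com/KSerg2022/lessons_homework | Lesson_3/main.py | sort_grades
-- ===== SOURCE A (Python) =====
-- def sort_grades(data, estimates):
--     data_sorted = []
--     estimates.sort(reverse=True)
--     data.sort(reverse=True)
--
--
--     for estimate in estimates:
--
--         for value in data:
--             if value.upper() == estimate.upper():
--                 data_sorted = data_sorted + list(value.upper())
--
--     return data_sorted
-- ===== SOURCE B (Python) =====
-- def sort_grades(data, estimates):
--     estimates.sort(reverse=True)
--     data.sort(reverse=True)
--     groups = {}
--     for value in data:
--         key = value.upper()
--         groups.setdefault(key, []).extend(key)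
--     out = []
--     for estimate in estimates:
--         out.extend(groups.get(estimate.upper(), []))
--     return out
-- ===== Notes on version B (the rewrite author's own statement) =====
-- stated objective: faster
-- what changed: B builds a dict grouping data's uppercase characters by uppercase key in one pass, then answers each sorted estimate by a single lookup, replacing A's rescan of all of data for every estimate.
import Mathlib
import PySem

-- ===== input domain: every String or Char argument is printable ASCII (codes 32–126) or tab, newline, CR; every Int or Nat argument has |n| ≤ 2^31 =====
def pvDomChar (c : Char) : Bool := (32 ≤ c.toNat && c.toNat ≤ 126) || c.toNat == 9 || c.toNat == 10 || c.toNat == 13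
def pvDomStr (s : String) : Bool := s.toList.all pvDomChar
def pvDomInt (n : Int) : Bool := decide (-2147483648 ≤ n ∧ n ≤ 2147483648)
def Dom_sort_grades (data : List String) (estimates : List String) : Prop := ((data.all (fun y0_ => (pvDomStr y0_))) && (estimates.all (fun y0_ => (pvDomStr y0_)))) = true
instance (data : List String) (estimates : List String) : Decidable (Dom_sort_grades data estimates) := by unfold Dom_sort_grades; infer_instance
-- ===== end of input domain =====

-- B groups data's uppercase characters by key once (dict) instead of rescanning data per estimate;
-- both A and B sort their list arguments in place (same side effect), the theorems are about the return value.

-- ===== PORT A =====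
-- list(value.upper()): the uppercase characters as one-character strings
def pvChars (v : String) : List String :=
  (PySem.Str.upper v).toList.map (fun c => String.ofList [c])

def sort_grades (data : List String) (estimates : List String) : List String :=
  let estimates := PySem.List.sorted estimates (fun x => x) true
  let data := PySem.List.sorted data (fun x => x) true
  estimates.foldl (fun data_sorted estimate =>
    data.foldl (fun data_sorted value =>
      if PySem.Str.upper value = PySem.Str.upper estimate then
        data_sorted ++ pvChars value
      else data_sorted) data_sorted) []

-- ===== PORT B =====
def sort_grades_alt (data : List String) (estimates : List String) : List String :=
  let estimates := PySem.List.sorted estimates (fun x => x) true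
  let data := PySem.List.sorted data (fun x => x) true
  let groups : PySem.Dict String (List String) :=
    data.foldl (fun d value =>
      let key := PySem.Str.upper value
      -- groups.setdefault(key, []).extend(key): the entry becomes its old value ++ key's chars
      d.insert key (d.getD key [] ++ key.toList.map (fun c => String.ofList [c]))) PySem.Dict.empty
  estimates.foldl (fun out estimate =>
    out ++ groups.getD (PySem.Str.upper estimate) []) []

-- ===== PRECONDITION & SPEC =====
def Spec_sort_grades (data : List String) (estimates : List String) (out : List String) : Prop := out = sort_grades_alt data estimates
instance (data : List String) (estimates : List String) (out : List String) : Decidable (Spec_sort_grades data estimates out) := by unfold Spec_sort_grades; infer_instance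

-- ===== CLAIM (what is proved, stated in full; the proofs are below) =====
def Claim_equal_sort_grades : Prop := ∀ (data : List String) (estimates : List String), Dom_sort_grades data estimates → Spec_sort_grades data estimates (sort_grades data estimates)

-- ===== LEMMAS AND PROOFS =====

-- B's grouping dict, looked up at k, is the matching uppercase chars of data in order.
theorem pv_groups_getD (data : List String) (d : PySem.Dict String (List String)) (k : String) :
    (data.foldl (fun d value =>
      let key := PySem.Str.upper value
      d.insert key (d.getD key [] ++ key.toList.map (fun c => String.ofList [c]))) d).getD k []
    = d.getD k [] ++ data.flatMap (fun v => if PySem.Str.upper v = k then pvChars v else []) := by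
  induction data generalizing d with
  | nil => simp
  | cons v vs ih =>
    simp only [List.foldl_cons, List.flatMap_cons, ih]
    rw [PySem.Dict.getD_insert]
    by_cases h : k = PySem.Str.upper v
    · simp [h, pvChars]
    · have h2 : ¬ PySem.Str.upper v = k := fun hh => h hh.symm
      simp [h, h2]

-- A's inner loop over data, as a flatMap segment.
theorem pv_inner (data : List String) (e : String) (acc : List String) :
    data.foldl (fun data_sorted value =>
      if PySem.Str.upper value = PySem.Str.upper e then data_sorted ++ pvChars value
      else data_sorted) acc
    = acc ++ data.flatMap (fun v => if PySem.Str.upper v = PySem.Str.upper e then pvChars v else []) := by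
  induction data generalizing acc with
  | nil => simp
  | cons v vs ih =>
    simp only [List.foldl_cons, List.flatMap_cons, ih]
    by_cases h : PySem.Str.upper v = PySem.Str.upper e <;> simp [h]

-- ===== VERDICT (by name: the statement is the Claim_ definition above) =====
theorem sort_grades_spec : Claim_equal_sort_grades := by
  intro data estimates _
  unfold Spec_sort_grades sort_grades sort_grades_alt
  simp only
  generalize PySem.List.sorted estimates (fun x => x) true = es
  generalize PySem.List.sorted data (fun x => x) true = ds
  induction es using List.reverseRecOn with
  | nil => rfl
  | append_singleton es e ih =>
    simp only [List.foldl_append, List.foldl_cons, List.foldl_nil, pv_inner, pv_groups_getD]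
    simp
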